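-- pv_equiv track=rewrite | github.com/ferhatelmas/algo | topCoder/srms/300s/srm385/div2/russian_speed_limits.py | getCurrentLimit
-- ===== SOURCE A (Python) =====
-- def getCurrentLimit(signs):
--     c, s = True, 60
--     for sign in signs:
--         if sign == 'default':
--             s = 60 if c else 90
--         elif sign == 'city':
--             s = 90 if c else 60
--             c = not c
--         else:
--             s = int(sign)
--     return s
-- ===== SOURCE B (Python) =====
-- def getCurrentLimit(signs):
--     # parse every numeric sign once; the final limit is decided by the last sign alone
--     numbers = [int(s) for s in signs if s != 'default' and s != 'city']
--     if not signs:
--         return 60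
--     last = signs[-1]
--     if last != 'default' and last != 'city':
--         return numbers[-1]
--     even = signs[:-1].count('city') % 2 == 0
--     return (60 if even else 90) if last == 'default' else (90 if even else 60)
-- ===== Notes on version B (the rewrite author's own statement) =====
-- stated objective: alternative
-- what changed: Replaces A's stateful forward fold (speed value + parity flag carried through every sign) by a one-shot parse of the numeric signs plus a last-sign dispatch on the parity count of 'city' among the earlier signs.
import Mathlib
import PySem

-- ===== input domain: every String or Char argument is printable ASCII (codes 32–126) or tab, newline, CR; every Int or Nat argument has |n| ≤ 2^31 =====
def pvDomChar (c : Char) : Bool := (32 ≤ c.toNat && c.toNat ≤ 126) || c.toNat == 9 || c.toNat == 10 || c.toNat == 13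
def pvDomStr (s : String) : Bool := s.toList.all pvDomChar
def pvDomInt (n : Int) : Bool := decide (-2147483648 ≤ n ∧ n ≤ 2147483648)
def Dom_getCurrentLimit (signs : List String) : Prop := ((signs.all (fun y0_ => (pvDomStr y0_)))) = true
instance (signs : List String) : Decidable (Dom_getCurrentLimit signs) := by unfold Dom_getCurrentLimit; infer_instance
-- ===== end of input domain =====

-- B replaces A's stateful forward fold by a last-sign lookup plus one parity count of 'city'
-- among the earlier signs (alternative decomposition, same O(n) cost).

-- ===== PORT A =====
-- loop body of A: state (c, s); int(sign) = PySem.Int.ofStr?, `.getD 0` is unreachable under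
-- Pre_getCurrentLimit (Python raises ValueError exactly where ofStr? is none).
def pvStepA (st : Bool × Int) (sign : String) : Bool × Int :=
  if sign = "default" then (st.1, if st.1 then 60 else 90)
  else if sign = "city" then (!st.1, if st.1 then 90 else 60)
  else (st.1, (PySem.Int.ofStr? sign).getD 0)

def getCurrentLimit (signs : List String) : Int :=
  (signs.foldl pvStepA (true, 60)).2

-- ===== PORT B =====
def getCurrentLimit_alt (signs : List String) : Int :=
  -- numbers = [int(s) for s in signs if s != 'default' and s != 'city']
  let numbers := (signs.filter (fun s => s ≠ "default" ∧ s ≠ "city")).map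
    (fun s => (PySem.Int.ofStr? s).getD 0)       -- int(s); `.getD 0` unreachable under Pre_
  match signs.getLast? with
  | none => 60                                   -- `if not signs: return 60`
  | some last =>
    if last ≠ "default" ∧ last ≠ "city" then
      (PySem.List.pyGet? numbers (-1)).getD 0    -- numbers[-1]
    else
      let even := (signs.dropLast.count "city") % 2 = 0   -- signs[:-1].count('city') % 2 == 0
      if last = "default" then (if even then 60 else 90)
      else (if even then 90 else 60)

-- ===== PRECONDITION & SPEC =====
-- Pre_ excludes exactly the inputs where Python A raises ValueError: some sign that is neither
-- 'default' nor 'city' is not a valid int literal.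
def Pre_getCurrentLimit (signs : List String) : Prop :=
  ∀ s ∈ signs, s = "default" ∨ s = "city" ∨ (PySem.Int.ofStr? s).isSome = true
instance (signs : List String) : Decidable (Pre_getCurrentLimit signs) := by
  unfold Pre_getCurrentLimit; infer_instance
def pvWitness_getCurrentLimit : List String := ["40", "city", "default", "city"]

def Spec_getCurrentLimit (signs : List String) (out : Int) : Prop := out = getCurrentLimit_alt signs
instance (signs : List String) (out : Int) : Decidable (Spec_getCurrentLimit signs out) := by unfold Spec_getCurrentLimit; infer_instance

-- ===== CLAIM (what is proved, stated in full; the proofs are below) =====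
def Claim_equal_getCurrentLimit : Prop := ∀ (signs : List String), Dom_getCurrentLimit signs → Pre_getCurrentLimit signs → Spec_getCurrentLimit signs (getCurrentLimit signs)

-- ===== LEMMAS AND PROOFS =====

theorem pv_parity_succ (n : Nat) : ((n + 1) % 2 = 0) ↔ ¬ (n % 2 = 0) := by omega

-- Characterisation of A's fold from an arbitrary start state: the final speed is determined by
-- the last sign and the parity of the 'city' count among the earlier signs.
theorem pv_foldA_char (signs : List String) (c : Bool) (s : Int) :
    (signs.foldl pvStepA (c, s)).2 =
      match signs.getLast? with
      | none => s
      | some last =>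
        if last = "default" then
          (if c = ((signs.dropLast.count "city") % 2 = 0) then 60 else 90)
        else if last = "city" then
          (if c = ((signs.dropLast.count "city") % 2 = 0) then 90 else 60)
        else (PySem.Int.ofStr? last).getD 0 := by
  induction signs generalizing c s with
  | nil => rfl
  | cons x rest ih =>
    cases rest with
    | nil =>
      simp only [List.foldl_cons, List.foldl_nil, List.getLast?_singleton, List.dropLast_singleton,
        pvStepA]
      by_cases hx : x = "default" <;> by_cases hy : x = "city" <;> simp [hx, hy]
    | cons y t =>
      have hfold : List.foldl pvStepA (c, s) (x :: y :: t)
          = List.foldl pvStepA (pvStepA (c, s) x) (y :: t) := rfl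
      rw [hfold, ih]
      have hlast : (x :: y :: t).getLast? = (y :: t).getLast? := by
        simp [List.getLast?_cons_cons]
      have hdrop : (x :: y :: t).dropLast = x :: (y :: t).dropLast := rfl
      rw [hlast, hdrop]
      cases hl : (y :: t).getLast? with
      | none => simp at hl
      | some last =>
        by_cases hx : x = "default"
        · simp [pvStepA, hx]
        · by_cases hy : x = "city"
          · -- the step flips c and the count of 'city' grows by one: parities cancel
            subst hy
            have hcnt : List.count "city" ("city" :: (y :: t).dropLast)
                = List.count "city" ((y :: t).dropLast) + 1 := by simp
            rw [hcnt]
            simp only [pvStepA]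
            cases c <;>
              by_cases hp : (List.count "city" ((y :: t).dropLast)) % 2 = 0 <;>
                simp [pv_parity_succ, hp]
          · have hcnt : (x :: (y :: t).dropLast).count "city"
                = (y :: t).dropLast.count "city" := by
              simp [hy]
            simp [pvStepA, hx, hy, hcnt]

-- ===== VERDICT (by name: the statement is the Claim_ definition above) =====
theorem getCurrentLimit_spec : Claim_equal_getCurrentLimit := by
  intro signs _ _
  unfold Spec_getCurrentLimit getCurrentLimit getCurrentLimit_alt
  rw [pv_foldA_char]
  cases h : signs.getLast? with
  | none => rfl
  | some last =>
    by_cases hd : last = "default"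
    · simp [hd]
    · by_cases hc : last = "city"
      · simp [hc]
      · rcases List.getLast?_eq_some_iff.mp h with ⟨init, rfl⟩
        simp [PySem.List.pyGet?_neg_one, hd, hc]
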